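-- pv_equiv track=rewrite | github.com/DylanSalisbury/advent-of-code-2020 | python/16/util.py | ticket_invalid_values
-- ===== SOURCE A (Python) =====
-- def ticket_invalid_values(ticket, field_spec):
--   result = [ ]
--   for v in ticket:
--     v_valid = False
--     for f in field_spec.values():
--       for p in f:
--         if (v >= p[0] and v <= p[1]):
--           v_valid = True
--     if not v_valid:
--       result.append(v)
--   return result
-- ===== SOURCE B (Python) =====
-- def ticket_invalid_values(ticket, field_spec):
--   pairs = []
--   for f in field_spec.values():
--     pairs.extend(f)
--   pairs.sort(key=lambda p: p[0])
--   merged = []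
--   for lo, hi in pairs:
--     if merged and lo <= merged[-1][1]:
--       last = merged[-1]
--       merged[-1] = (last[0], max(last[1], hi))
--     else:
--       merged.append((lo, hi))
--   starts = [p[0] for p in merged]
--   result = []
--   for v in ticket:
--     i, j = 0, len(starts)
--     while i < j:
--       mid = (i + j) // 2
--       if starts[mid] <= v:
--         i = mid + 1
--       else:
--         j = mid
--     if i == 0 or v > merged[i - 1][1]:
--       result.append(v)
--   return result
-- ===== Notes on version B (the rewrite author's own statement) =====
-- stated objective: faster
-- what changed: B flattens all field ranges once, sorts them by lower bound and merges them into an ordered list of disjoint intervals, then decides each ticket value with a binary search over the merged starts instead of scanning every range for every value.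
import Mathlib
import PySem

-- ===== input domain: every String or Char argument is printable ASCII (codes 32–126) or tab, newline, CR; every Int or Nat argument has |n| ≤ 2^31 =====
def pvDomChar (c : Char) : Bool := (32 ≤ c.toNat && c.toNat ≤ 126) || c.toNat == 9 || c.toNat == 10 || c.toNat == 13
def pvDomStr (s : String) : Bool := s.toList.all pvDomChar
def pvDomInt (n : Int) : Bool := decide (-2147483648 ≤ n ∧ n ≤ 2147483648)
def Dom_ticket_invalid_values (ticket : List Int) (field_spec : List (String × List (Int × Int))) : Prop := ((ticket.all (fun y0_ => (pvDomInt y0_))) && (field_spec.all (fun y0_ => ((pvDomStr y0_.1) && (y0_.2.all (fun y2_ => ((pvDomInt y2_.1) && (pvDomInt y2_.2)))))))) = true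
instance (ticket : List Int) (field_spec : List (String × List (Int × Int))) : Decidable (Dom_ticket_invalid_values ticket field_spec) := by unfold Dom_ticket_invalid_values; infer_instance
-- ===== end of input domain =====

-- B replaces A's scan of every field range per ticket value by sort-merge of the
-- ranges into disjoint intervals plus a binary search per value (objective: faster).

-- ===== PORT A =====
-- literal transliteration of A: for each v, a flag set by scanning every pair of
-- every field, then append v to result when the flag stayed False
def ticket_invalid_values (ticket : List Int) (field_spec : List (String × List (Int × Int))) : List Int :=
  ticket.foldl (fun result v =>
    let v_valid := field_spec.foldl (fun acc kf =>
      kf.2.foldl (fun a p => if v ≥ p.1 ∧ v ≤ p.2 then true else a) acc) false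
    if v_valid = false then result ++ [v] else result) []

-- ===== PORT B =====
-- pairs.extend(f) loop of Source B
def tivPairs (field_spec : List (String × List (Int × Int))) : List (Int × Int) :=
  field_spec.foldl (fun acc kf => acc ++ kf.2) []

-- one step of Source B's merging loop; the accumulator stores `merged` REVERSED, so the
-- head is Python's merged[-1] (updated in place) and appending is a cons
def tivMergeStep (acc : List (Int × Int)) (p : Int × Int) : List (Int × Int) :=
  match acc with
  | [] => [p]
  | (a, b) :: rest => if p.1 ≤ b then (a, max b p.2) :: rest else p :: (a, b) :: rest

-- Source B's hand-written while-loop binary search (bisect_right over starts)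
def tivBsearch (starts : List Int) (v : Int) (i j : Nat) : Nat :=
  if _h : i < j then
    let mid := (i + j) / 2
    if starts.getD mid 0 ≤ v then tivBsearch starts v (mid + 1) j
    else tivBsearch starts v i mid
  else i
termination_by j - i

def ticket_invalid_values_alt (ticket : List Int) (field_spec : List (String × List (Int × Int))) : List Int :=
  let pairs := PySem.List.sorted (tivPairs field_spec) (fun p => p.1) false
  let merged := (pairs.foldl tivMergeStep []).reverse
  let starts := merged.map (fun p => p.1)
  ticket.foldl (fun result v =>
    let i := tivBsearch starts v 0 starts.length
    if i = 0 ∨ v > (merged.getD (i - 1) (0, 0)).2 then result ++ [v] else result) []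

-- ===== PRECONDITION & SPEC =====
def Spec_ticket_invalid_values (ticket : List Int) (field_spec : List (String × List (Int × Int))) (out : List Int) : Prop := out = ticket_invalid_values_alt ticket field_spec
instance (ticket : List Int) (field_spec : List (String × List (Int × Int))) (out : List Int) : Decidable (Spec_ticket_invalid_values ticket field_spec out) := by unfold Spec_ticket_invalid_values; infer_instance

-- ===== CLAIM (what is proved, stated in full; the proofs are below) =====
def Claim_equal_ticket_invalid_values : Prop := ∀ (ticket : List Int) (field_spec : List (String × List (Int × Int))), Dom_ticket_invalid_values ticket field_spec → Spec_ticket_invalid_values ticket field_spec (ticket_invalid_values ticket field_spec)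

-- ===== LEMMAS AND PROOFS =====

-- `covered l v` : some pair of l is a range containing v
def tivCov (l : List (Int × Int)) (v : Int) : Prop := ∃ p ∈ l, p.1 ≤ v ∧ v ≤ p.2

lemma tivCov_nil (v : Int) : tivCov [] v ↔ False := by simp [tivCov]

lemma tivCov_cons (p : Int × Int) (t : List (Int × Int)) (v : Int) :
    tivCov (p :: t) v ↔ (p.1 ≤ v ∧ v ≤ p.2) ∨ tivCov t v := by
  simp [tivCov]

-- A's inner flag loop is an `any`
lemma tiv_flag_inner (v : Int) (l : List (Int × Int)) (acc : Bool) :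
    l.foldl (fun a p => if v ≥ p.1 ∧ v ≤ p.2 then true else a) acc
      = (acc || l.any (fun p => decide (p.1 ≤ v ∧ v ≤ p.2))) := by
  induction l generalizing acc with
  | nil => simp
  | cons p t ih =>
    simp only [List.foldl_cons, List.any_cons, ih]
    by_cases h : v ≥ p.1 ∧ v ≤ p.2 <;> simp [h, and_comm]

lemma tiv_flag (v : Int) (fs : List (String × List (Int × Int))) (acc : Bool) :
    fs.foldl (fun acc kf =>
        kf.2.foldl (fun a p => if v ≥ p.1 ∧ v ≤ p.2 then true else a) acc) acc
      = (acc || (tivPairs fs).any (fun p => decide (p.1 ≤ v ∧ v ≤ p.2))) := by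
  have hpairs : tivPairs fs = fs.flatMap (fun kf => kf.2) := by
    unfold tivPairs
    rw [PySem.List.foldl_append_eq_flatMap]
    simp
  rw [hpairs]
  clear hpairs
  induction fs generalizing acc with
  | nil => simp
  | cons kf t ih =>
    rw [List.foldl_cons, ih, tiv_flag_inner, List.flatMap_cons, List.any_append,
      Bool.or_assoc]

-- coverage is preserved by the merging loop (on a list sorted by first component)
lemma tiv_merge_cov (v : Int) :
    ∀ (s : List (Int × Int)) (a b : Int) (rest : List (Int × Int)),
    s.Pairwise (fun p q => p.1 ≤ q.1) → (∀ p ∈ s, a ≤ p.1) →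
    (tivCov (s.foldl tivMergeStep ((a, b) :: rest)) v ↔
      (a ≤ v ∧ v ≤ b) ∨ tivCov rest v ∨ tivCov s v) := by
  intro s
  induction s with
  | nil => intro a b rest _ _; simp [tivCov_cons, tivCov_nil]
  | cons p t ih =>
    intro a b rest hp ha
    obtain ⟨l, h⟩ := p
    rw [List.pairwise_cons] at hp
    have hal : a ≤ l := ha (l, h) (List.mem_cons_self ..)
    simp only [List.foldl_cons, tivMergeStep]
    by_cases hc : l ≤ b
    · simp only [if_pos hc]
      rw [ih a (max b h) rest hp.2 (fun q hq => le_trans hal (hp.1 q hq))]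
      simp only [tivCov_cons]
      constructor
      · rintro (⟨h1, h2⟩ | hr | hct)
        · by_cases hb : v ≤ b
          · exact Or.inl ⟨h1, hb⟩
          · exact Or.inr (Or.inr (Or.inl ⟨by omega, by omega⟩))
        · exact Or.inr (Or.inl hr)
        · exact Or.inr (Or.inr (Or.inr hct))
      · rintro (⟨h1, h2⟩ | hr | ⟨h1, h2⟩ | hct)
        · exact Or.inl ⟨h1, by omega⟩
        · exact Or.inr (Or.inl hr)
        · exact Or.inl ⟨by omega, by omega⟩
        · exact Or.inr (Or.inr hct)
    · simp only [if_neg hc]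
      rw [ih l h ((a, b) :: rest) hp.2 hp.1]
      simp only [tivCov_cons]
      tauto

-- the merging loop output is a reversed chain: later (deeper) intervals start strictly
-- after earlier ones end, and starts are non-decreasing front-to-back
lemma tiv_merge_chain :
    ∀ (s acc : List (Int × Int)),
    s.Pairwise (fun p q => p.1 ≤ q.1) →
    (∀ p ∈ s, ∀ q ∈ acc.head?, q.1 ≤ p.1) →
    acc.Pairwise (fun p q => q.2 < p.1 ∧ q.1 ≤ p.1) →
    (s.foldl tivMergeStep acc).Pairwise (fun p q => q.2 < p.1 ∧ q.1 ≤ p.1) := by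
  intro s
  induction s with
  | nil => intro acc _ _ hacc; exact hacc
  | cons p t ih =>
    intro acc hp hhead hacc
    obtain ⟨l, h⟩ := p
    rw [List.pairwise_cons] at hp
    cases acc with
    | nil =>
      simp only [List.foldl_cons, tivMergeStep]
      exact ih [(l, h)] hp.2 (fun q hq o ho => by
        simp only [List.head?_cons, Option.mem_def, Option.some.injEq] at ho
        exact ho ▸ hp.1 q hq) (List.pairwise_singleton ..)
    | cons q rest =>
      obtain ⟨a, b⟩ := q
      have hal : a ≤ l := hhead (l, h) (List.mem_cons_self ..) (a, b) (by simp)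
      rw [List.pairwise_cons] at hacc
      simp only [List.foldl_cons, tivMergeStep]
      by_cases hc : l ≤ b
      · simp only [if_pos hc]
        refine ih ((a, max b h) :: rest) hp.2 (fun q hq o ho => ?_) ?_
        · simp only [List.head?_cons, Option.mem_def, Option.some.injEq] at ho
          subst ho; exact le_trans hal (hp.1 q hq)
        · exact List.pairwise_cons.mpr ⟨fun r hr => hacc.1 r hr, hacc.2⟩
      · simp only [if_neg hc]
        refine ih ((l, h) :: (a, b) :: rest) hp.2 (fun q hq o ho => ?_) ?_
        · simp only [List.head?_cons, Option.mem_def, Option.some.injEq] at ho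
          subst ho; exact hp.1 q hq
        · refine List.pairwise_cons.mpr ⟨?_, List.pairwise_cons.mpr ⟨hacc.1, hacc.2⟩⟩
          intro r hr
          rcases List.mem_cons.mp hr with hr | hr
          · subst hr; exact ⟨by omega, hal⟩
          · have := hacc.1 r hr; exact ⟨by omega, by omega⟩

-- binary-search postcondition on a sorted list
lemma tiv_bsearch_spec (starts : List Int) (v : Int)
    (hs : starts.Pairwise (· ≤ ·)) :
    ∀ (i j : Nat), i ≤ j → j ≤ starts.length →
    (∀ k < i, starts.getD k 0 ≤ v) →
    (∀ k, j ≤ k → k < starts.length → v < starts.getD k 0) →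
    (i ≤ tivBsearch starts v i j ∧ tivBsearch starts v i j ≤ j ∧
     (∀ k < tivBsearch starts v i j, starts.getD k 0 ≤ v) ∧
     (∀ k, tivBsearch starts v i j ≤ k → k < starts.length → v < starts.getD k 0)) := by
  have hmono : ∀ (p q : Nat), p ≤ q → q < starts.length → starts.getD p 0 ≤ starts.getD q 0 := by
    intro p q hpq hq
    rcases Nat.eq_or_lt_of_le hpq with rfl | hlt
    · exact le_refl _
    · rw [List.getD_eq_getElem _ _ (lt_trans hlt hq), List.getD_eq_getElem _ _ hq]
      exact List.pairwise_iff_getElem.mp hs p q (lt_trans hlt hq) hq hlt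
  have main : ∀ (n i j : Nat), j - i ≤ n → i ≤ j → j ≤ starts.length →
      (∀ k < i, starts.getD k 0 ≤ v) →
      (∀ k, j ≤ k → k < starts.length → v < starts.getD k 0) →
      (i ≤ tivBsearch starts v i j ∧ tivBsearch starts v i j ≤ j ∧
       (∀ k < tivBsearch starts v i j, starts.getD k 0 ≤ v) ∧
       (∀ k, tivBsearch starts v i j ≤ k → k < starts.length → v < starts.getD k 0)) := by
    intro n
    induction n with
    | zero =>
      intro i j hn hij hjl hlo hhi
      have : i = j := by omega
      subst this
      rw [tivBsearch]
      simp only [lt_irrefl, dif_neg, not_false_iff]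
      exact ⟨le_refl _, le_refl _, hlo, hhi⟩
    | succ n ih =>
      intro i j hn hij hjl hlo hhi
      rw [tivBsearch]
      by_cases hij' : i < j
      · simp only [dif_pos hij']
        have hmid1 : i ≤ (i + j) / 2 := by omega
        have hmid2 : (i + j) / 2 < j := by omega
        by_cases hv : starts.getD ((i + j) / 2) 0 ≤ v
        · simp only [if_pos hv]
          have hlo' : ∀ k < (i + j) / 2 + 1, starts.getD k 0 ≤ v := by
            intro k hk
            rcases Nat.lt_or_ge k i with hk' | hk'
            · exact hlo k hk'
            · exact le_trans (hmono k ((i + j) / 2) (by omega) (by omega)) hv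
          obtain ⟨h1, h2, h3, h4⟩ := ih ((i + j) / 2 + 1) j (by omega) (by omega) hjl hlo' hhi
          exact ⟨by omega, h2, h3, h4⟩
        · simp only [if_neg hv]
          have hhi' : ∀ k, (i + j) / 2 ≤ k → k < starts.length → v < starts.getD k 0 := by
            intro k hk hkl
            exact lt_of_lt_of_le (by omega : v < starts.getD ((i + j) / 2) 0)
              (hmono ((i + j) / 2) k hk hkl)
          obtain ⟨h1, h2, h3, h4⟩ := ih i ((i + j) / 2) (by omega) (by omega) (by omega) hlo hhi'
          exact ⟨h1, by omega, h3, h4⟩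
      · simp only [dif_neg hij']
        exact ⟨le_refl _, hij, hlo, fun k hk hkl => hhi k (by omega) hkl⟩
  intro i j hij hjl hlo hhi
  exact main (j - i) i j (le_refl _) hij hjl hlo hhi

-- the per-value checks of A and B agree: B's binary-search test on the merged
-- intervals holds exactly when no original pair covers v
lemma tiv_check (v : Int) (pairs merged : List (Int × Int))
    (hm : merged = ((PySem.List.sorted pairs (fun p => p.1) false).foldl tivMergeStep []).reverse) :
    (tivBsearch (merged.map (fun p => p.1)) v 0 (merged.map (fun p => p.1)).length = 0 ∨
      v > (merged.getD (tivBsearch (merged.map (fun p => p.1)) v 0 (merged.map (fun p => p.1)).length - 1) (0, 0)).2)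
      ↔ ¬ tivCov pairs v := by
  have hpair : (PySem.List.sorted pairs (fun p : Int × Int => p.1) false).Pairwise
      (fun p q : Int × Int => p.1 ≤ q.1) := PySem.List.sorted_pairwise pairs _
  have hrev : ∀ (l : List (Int × Int)), tivCov l.reverse v ↔ tivCov l v := by
    intro l; simp [tivCov]
  -- coverage is preserved end to end
  have hcov : tivCov merged v ↔ tivCov pairs v := by
    rw [hm, hrev]
    have hcps : tivCov (PySem.List.sorted pairs (fun p : Int × Int => p.1) false) v ↔ tivCov pairs v := by
      unfold tivCov; simp [PySem.List.mem_sorted]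
    rw [← hcps]
    cases hps : PySem.List.sorted pairs (fun p : Int × Int => p.1) false with
    | nil => simp [tivCov_nil]
    | cons p t =>
      obtain ⟨a, b⟩ := p
      rw [hps] at hpair
      rw [List.pairwise_cons] at hpair
      rw [List.foldl_cons]
      show tivCov (t.foldl tivMergeStep [(a, b)]) v ↔ _
      rw [tiv_merge_cov v t a b [] hpair.2 hpair.1]
      simp [tivCov_nil, tivCov_cons]
  -- the merged list is a chain of disjoint intervals with non-decreasing starts
  have hchain : merged.Pairwise (fun p q : Int × Int => p.2 < q.1 ∧ p.1 ≤ q.1) := by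
    rw [hm, List.pairwise_reverse]
    exact tiv_merge_chain _ [] hpair (by simp) (List.Pairwise.nil)
  have hssort : (merged.map (fun p => p.1)).Pairwise (fun a b : Int => a ≤ b) := by
    rw [List.pairwise_map]
    exact hchain.imp (fun h => h.2)
  have hlen : (merged.map (fun p : Int × Int => p.1)).length = merged.length := List.length_map ..
  obtain ⟨-, hr2, hr3, hr4⟩ := tiv_bsearch_spec (merged.map (fun p => p.1)) v hssort
    0 (merged.map (fun p => p.1)).length (Nat.zero_le _) (le_refl _)
    (fun k hk => absurd hk (Nat.not_lt_zero k)) (fun k hk hkl => absurd hkl (by omega))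
  set r := tivBsearch (merged.map (fun p => p.1)) v 0 (merged.map (fun p => p.1)).length with hrdef
  have hget : ∀ (k : Nat) (hk : k < merged.length),
      (merged.map (fun p : Int × Int => p.1)).getD k 0 = (merged[k]'hk).1 := by
    intro k hk
    rw [List.getD_eq_getElem _ _ (by omega), List.getElem_map]
  rw [← hcov]
  constructor
  · rintro hB ⟨p, hp, hp1, hp2⟩
    obtain ⟨k, hk, hkp⟩ := List.mem_iff_getElem.mp hp
    rcases hB with h0 | hgt
    · have := hr4 k (by omega) (by omega)
      rw [hget k hk, hkp] at this
      omega
    · by_cases h0 : r = 0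
      · have := hr4 k (h0 ▸ Nat.zero_le k) (by omega)
        rw [hget k hk, hkp] at this
        omega
      · have hkr : k < r := by
          by_contra hge
          have := hr4 k (by omega) (by omega)
          rw [hget k hk, hkp] at this
          omega
        rcases Nat.lt_or_ge k (r - 1) with hk1 | hk1
        · have hk2 : k + 1 < merged.length := by rw [hlen] at hr2; omega
          have hnext : (merged[k + 1]'hk2).1 ≤ v := by
            have := hr3 (k + 1) (by omega)
            rwa [hget (k + 1) hk2] at this
          have := (List.pairwise_iff_getElem.mp hchain k (k + 1) hk hk2 (by omega)).1
          rw [hkp] at this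
          omega
        · have hkeq : k = r - 1 := by omega
          have hgd : merged.getD (r - 1) (0, 0) = p := by
            rw [← hkeq, List.getD_eq_getElem _ _ hk, hkp]
          rw [hgd] at hgt
          omega
  · intro hnc
    by_cases h0 : r = 0
    · exact Or.inl h0
    · refine Or.inr ?_
      by_contra hle
      have hr1 : r - 1 < merged.length := by rw [hlen] at hr2; omega
      have hfst : (merged[r - 1]'hr1).1 ≤ v := by
        have := hr3 (r - 1) (by omega)
        rwa [hget (r - 1) hr1] at this
      have hsnd : v ≤ (merged[r - 1]'hr1).2 := by
        rw [List.getD_eq_getElem _ _ hr1] at hle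
        omega
      exact hnc ⟨merged[r - 1]'hr1, List.getElem_mem hr1, hfst, hsnd⟩

-- ===== VERDICT (by name: the statement is the Claim_ definition above) =====
theorem ticket_invalid_values_spec : Claim_equal_ticket_invalid_values := by
  intro ticket fs _
  show ticket_invalid_values ticket fs = ticket_invalid_values_alt ticket fs
  simp only [ticket_invalid_values, ticket_invalid_values_alt]
  have hany : ∀ v : Int, (((tivPairs fs).any (fun p => decide (p.1 ≤ v ∧ v ≤ p.2))) = false)
      ↔ ¬ tivCov (tivPairs fs) v := by
    intro v; simp [tivCov]
  have hA : (fun (result : List Int) (v : Int) =>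
      let v_valid := fs.foldl (fun acc kf =>
        kf.2.foldl (fun a p => if v ≥ p.1 ∧ v ≤ p.2 then true else a) acc) false
      if v_valid = false then result ++ [v] else result)
      = fun result v => if (!((tivPairs fs).any (fun p => decide (p.1 ≤ v ∧ v ≤ p.2)))) = true
          then result ++ [v] else result := by
    funext result v
    have hflag := tiv_flag v fs false
    simp only [Bool.false_or] at hflag
    simp only [hflag, Bool.not_eq_true']
  have hB : (fun (result : List Int) (v : Int) =>
      let i := tivBsearch ((((PySem.List.sorted (tivPairs fs) (fun p => p.1) false).foldl tivMergeStep []).reverse).map (fun p => p.1)) v 0 ((((PySem.List.sorted (tivPairs fs) (fun p => p.1) false).foldl tivMergeStep []).reverse).map (fun p => p.1)).length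
      if i = 0 ∨ v > ((((PySem.List.sorted (tivPairs fs) (fun p => p.1) false).foldl tivMergeStep []).reverse).getD (i - 1) (0, 0)).2 then result ++ [v] else result)
      = fun result v => if (!((tivPairs fs).any (fun p => decide (p.1 ≤ v ∧ v ≤ p.2)))) = true
          then result ++ [v] else result := by
    funext result v
    have hchk := tiv_check v (tivPairs fs)
      (((PySem.List.sorted (tivPairs fs) (fun p => p.1) false).foldl tivMergeStep []).reverse) rfl
    have hiff : (tivBsearch ((((PySem.List.sorted (tivPairs fs) (fun p => p.1) false).foldl tivMergeStep []).reverse).map (fun p => p.1)) v 0 ((((PySem.List.sorted (tivPairs fs) (fun p => p.1) false).foldl tivMergeStep []).reverse).map (fun p => p.1)).length = 0 ∨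
        v > ((((PySem.List.sorted (tivPairs fs) (fun p => p.1) false).foldl tivMergeStep []).reverse).getD (tivBsearch ((((PySem.List.sorted (tivPairs fs) (fun p => p.1) false).foldl tivMergeStep []).reverse).map (fun p => p.1)) v 0 ((((PySem.List.sorted (tivPairs fs) (fun p => p.1) false).foldl tivMergeStep []).reverse).map (fun p => p.1)).length - 1) (0, 0)).2)
        ↔ ((!((tivPairs fs).any (fun p => decide (p.1 ≤ v ∧ v ≤ p.2)))) = true) := by
      rw [hchk, Bool.not_eq_true', hany v]
    exact if_congr hiff rfl rfl
  rw [hA, hB]
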